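-- pv_equiv track=rewrite | github.com/sasha-klnd/advent-of-code-2024 | Day06/day06-1.py | find_trajectory
-- ===== SOURCE A (Python) =====
-- def turn(current_dir):
--     # Turns the guard 90 degrees clockwise
--     match current_dir:
--         case '^':
--             return '>'
--         case '>':
--             return 'v'
--         case 'v':
--             return '<'
--         case '<':
--             return '^'
--
-- def find_trajectory(map):
--     position = [0,0]
--     next_position = [0,0]
--     direction = '^'
--     visited_tiles = 0
--
--     # Find initial guard position
--     for i in range(len(map)):
--         if '^' in map[i]:
--             position[1] = map[i].index('^')
--             position[0] = i
--             break
--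
--     while True:
--         # Get next tile
--         if direction == '^':
--             next_position[0] = position[0] - 1
--             next_position[1] = position[1]
--
--         elif direction == '>':
--             next_position[0] = position[0]
--             next_position[1] = position[1] + 1
--
--         elif direction == 'v':
--             next_position[0] = position[0] + 1
--             next_position[1] = position[1]
--
--         elif direction == '<':
--             next_position[0] = position[0]
--             next_position[1] = position[1] - 1
--
--
--         if not (next_position[0] >= 0 and next_position[0] < len(map) and next_position[1] >= 0 and next_position[1] < len(map[0])):
--             break
--         elif map[next_position[0]][next_position[1]] == '#':
--             direction = turn(direction)
--             map[position[0]][position[1]] = direction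
--         else:
--             map[next_position[0]][next_position[1]] = direction
--             map[position[0]][position[1]] = 'X'
--             position[0], position[1] = next_position[0], next_position[1]
--
--     map[position[0]][position[1]] = 'X'
--
--     for row in map:
--         visited_tiles += row.count("X")
--
--     return visited_tiles
-- ===== SOURCE B (Python) =====
-- def find_trajectory(map):
--     # Jump-based patrol: index the obstacle positions once (per-row column lists and a
--     # per-column dict of row lists), then move the guard whole straight segments at a
--     # time -- the next blocked step is the minimum obstacle distance ahead, or the
--     # distance to the wall.  The trail is marked 'X' on the map and the marks counted.
--     H, W = len(map), len(map[0])
--     row_obst = [[j for j, cell in enumerate(row) if cell == '#'] for row in map]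
--     col_obst = {}
--     for i, row in enumerate(map):
--         for j, cell in enumerate(row):
--             if cell == '#':
--                 col_obst.setdefault(j, []).append(i)
--
--     r, c = 0, 0
--     for i, row in enumerate(map):
--         if '^' in row:
--             r, c = i, row.index('^')
--             break
--
--     visited = {(r, c)}
--     deltas = ((-1, 0), (0, 1), (1, 0), (0, -1))
--     d = 0
--     while 0 <= r < H and 0 <= c < W:
--         dr, dc = deltas[d]
--         if dr:
--             dists = [(i - r) * dr for i in col_obst.get(c, [])]
--             wall = r + 1 if dr < 0 else H - r
--         else:
--             dists = [(j - c) * dc for j in row_obst[r]]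
--             wall = c + 1 if dc < 0 else W - c
--         step = min([t for t in dists if t > 0] + [wall])  # first blocked step ahead
--         for k in range(1, step):
--             visited.add((r + k * dr, c + k * dc))
--         if step == wall:
--             break
--         r += (step - 1) * dr
--         c += (step - 1) * dc
--         d = (d + 1) % 4
--
--     for i, j in visited:
--         map[i][j] = 'X'
--     return sum(row.count('X') for row in map)
-- ===== Notes on version B (the rewrite author's own statement) =====
-- stated objective: alternative
-- what changed: B precomputes an obstacle index (per-row column lists and a per-column dict of row lists) and moves the guard in whole straight segments -- the next blocked step is the minimum positive obstacle distance ahead or the wall distance -- collecting visited tiles per segment and marking them 'X' at the end, instead of A's cell-by-cell step-or-turn loop that mutates the map at every step and recounts 'X' per row.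
-- outside the precondition, e.g. on find_trajectory([['.', '.'], ['^']]): A returns 2, B returns 2; on find_trajectory([['^', '.'], ['.']]): A returns 1, B returns 1
import Mathlib
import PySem

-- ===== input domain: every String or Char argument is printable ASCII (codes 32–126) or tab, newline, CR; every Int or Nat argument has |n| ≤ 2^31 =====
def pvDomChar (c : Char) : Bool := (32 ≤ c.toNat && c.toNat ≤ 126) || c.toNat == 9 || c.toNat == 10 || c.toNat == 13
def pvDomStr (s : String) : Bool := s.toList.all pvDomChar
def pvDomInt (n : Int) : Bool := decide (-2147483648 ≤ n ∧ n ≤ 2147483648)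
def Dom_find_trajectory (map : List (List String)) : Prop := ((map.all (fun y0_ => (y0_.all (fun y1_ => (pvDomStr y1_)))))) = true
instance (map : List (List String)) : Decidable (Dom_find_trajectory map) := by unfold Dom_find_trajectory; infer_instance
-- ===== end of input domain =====

-- B replaces A's cell-by-cell marking walk by a jump-based patrol over a precomputed obstacle
-- index (per-row column lists, a per-column dict of rows): the guard moves whole straight
-- segments to the next obstacle or wall; B marks the same trail 'X' on the map and counts the
-- marks (alternative algorithm; it performs the same in-place mutation as A).


-- ===== PORT A =====

-- map[i][j] read; total form of Python's indexing — every use below sits behind A's own bounds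
-- check (0 ≤ i < len(map), 0 ≤ j < len(map[0])), where it is exact.
def pvGet2 (m : List (List String)) (i j : Int) : String :=
  PySem.List.pyGetD (PySem.List.pyGetD m i []) j ""

-- map[i][j] = v ; total form (out-of-range write is a no-op; every use is behind bounds known to hold)
def pvSet2 (m : List (List String)) (i j : Int) (v : String) : List (List String) :=
  PySem.List.pySetD m i (PySem.List.pySetD (PySem.List.pyGetD m i []) j v)

-- Python's `turn`; the final branch is Python's implicit None, unreachable (direction is always one of the four)
def turn (current_dir : String) : String :=
  if current_dir = "^" then ">"
  else if current_dir = ">" then "v"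
  else if current_dir = "v" then "<"
  else if current_dir = "<" then "^"
  else ""

-- `for i in range(len(map)): if '^' in map[i]: …; break` with the running index i
def pvFindStartA : List (List String) → Int → Int × Int
  | [], _ => (0, 0)
  | r :: rs, i =>
    if "^" ∈ r then (i, (((PySem.List.index? r "^").getD 0 : Nat) : Int))
    else pvFindStartA rs (i + 1)

-- the `while True` loop of A; fuel only makes it total (ample for every terminating run)
def pvStepA : Nat → List (List String) → Int → Int → String → List (List String) × Int × Int
  | 0, m, pr, pc, _ => (m, pr, pc)
  | Nat.succ fuel, m, pr, pc, direction =>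
    let np : Int × Int :=
      if direction = "^" then (pr - 1, pc)
      else if direction = ">" then (pr, pc + 1)
      else if direction = "v" then (pr + 1, pc)
      else (pr, pc - 1)
    if ¬ (0 ≤ np.1 ∧ np.1 < (m.length : Int) ∧ 0 ≤ np.2 ∧ np.2 < ((m.headD []).length : Int)) then
      (m, pr, pc)
    else if pvGet2 m np.1 np.2 = "#" then
      let direction' := turn direction
      pvStepA fuel (pvSet2 m pr pc direction') pr pc direction'
    else
      pvStepA fuel (pvSet2 (pvSet2 m np.1 np.2 direction) pr pc "X") np.1 np.2 direction

def find_trajectory (map : List (List String)) : Int :=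
  let position := pvFindStartA map 0
  let res := pvStepA (8 * map.length * (map.headD []).length + 8) map position.1 position.2 "^"
  let m' := pvSet2 res.1 res.2.1 res.2.2 "X"
  m'.foldl (fun acc row => acc + ((PySem.List.count row "X" : Nat) : Int)) 0

-- ===== PORT B =====

-- `for i, row in enumerate(map): if '^' in row: …; break`
def pvFindStartB : List (Int × List String) → Int × Int
  | [] => (0, 0)
  | (i, r) :: rest =>
    if "^" ∈ r then (i, (((PySem.List.index? r "^").getD 0 : Nat) : Int))
    else pvFindStartB rest

-- deltas = ((-1,0),(0,1),(1,0),(0,-1))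
def pvDeltas : List (Int × Int) := [(-1, 0), (0, 1), (1, 0), (0, -1)]

-- row_obst = [[j for j, cell in enumerate(row) if cell == '#'] for row in map]
def pvRowObst (map : List (List String)) : List (List Int) :=
  map.map (fun row => ((PySem.List.enumerate row 0).filter (fun q => q.2 == "#")).map (fun q => q.1))

-- col_obst: for i, row: for j, cell: if '#': col_obst.setdefault(j, []).append(i)
def pvColObst (map : List (List String)) : PySem.Dict Int (List Int) :=
  (PySem.List.enumerate map 0).foldl
    (fun d p => (PySem.List.enumerate p.2 0).foldl
      (fun d2 q => if q.2 = "#" then d2.insert q.1 (d2.getD q.1 [] ++ [p.1]) else d2) d)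
    PySem.Dict.empty

-- B's `while` loop; the fuel/gas device only makes it total: gas bounds the number of loop
-- iterations, fuel the number of walked cells (each iteration walks at most the remaining
-- fuel many cells); both bounds are ample for every terminating patrol
def pvWalkSeg (gas fuel : Nat) (ro : List (List Int)) (co : PySem.Dict Int (List Int))
    (h w r c : Int) (d : Nat) (vis : PySem.Set (Int × Int)) : PySem.Set (Int × Int) :=
  match gas, fuel with
  | 0, _ => vis
  | Nat.succ _, 0 => vis
  | Nat.succ g, Nat.succ f =>
    if ¬ (0 ≤ r ∧ r < h ∧ 0 ≤ c ∧ c < w) then vis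
    else
      let del := pvDeltas.getD d (0, 0)
      let dists := if del.1 ≠ 0 then (co.getD c []).map (fun i => (i - r) * del.1)
                   else (PySem.List.pyGetD ro r []).map (fun j => (j - c) * del.2)
      let wall := if del.1 ≠ 0 then (if del.1 < 0 then r + 1 else h - r)
                  else (if del.2 < 0 then c + 1 else w - c)
      -- step = min([t for t in dists if t > 0] + [wall]): first blocked step ahead
      let step := (PySem.List.min? (dists.filter (fun t => decide (0 < t)) ++ [wall]) (fun t => t)).getD 0
      let n := min (step - 1).toNat (Nat.succ f)
      let vis' := (PySem.List.pyRange 1 ((n : Int) + 1) 1).foldl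
        (fun v k => PySem.Set.add v (r + k * del.1, c + k * del.2)) vis
      if step = wall then vis'
      else if Nat.succ f ≤ (step - 1).toNat then vis'
      else pvWalkSeg g (f - (step - 1).toNat) ro co h w
        (r + (step - 1) * del.1) (c + (step - 1) * del.2) ((d + 1) % 4) vis'

def find_trajectory_alt (map : List (List String)) : Int :=
  let ro := pvRowObst map
  let co := pvColObst map
  let pos := pvFindStartB (PySem.List.enumerate map 0)
  let vis := pvWalkSeg (8 * map.length * (map.headD []).length + 8)
    (8 * map.length * (map.headD []).length + 8) ro co
    (map.length : Int) ((map.headD []).length : Int) pos.1 pos.2 0 (PySem.Set.ofList [pos])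
  let marked := vis.foldl (fun m p => pvSet2 m p.1 p.2 "X") map
  (marked.map (fun row => ((PySem.List.count row "X" : Nat) : Int))).sum

-- ===== PRECONDITION & SPEC =====

-- Pre_ excludes exactly the map shapes whose short rows A can index past (IndexError): with a
-- guard '^' present every row must be at least as long as row 0 (whether A survives a shorter
-- row depends on the walked path, which is not a closed-form property, so all such maps are
-- excluded — on some of them A happens to return because the guard leaves early, see cites);
-- without a guard A only ever touches map[0][0], so only an empty map / empty first row raises.
-- Maps whose obstacle layout makes the patrol cycle make the Python A (and B) loop forever;
-- that is not a closed-form property of the input either, so Pre_ does not exclude them — the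
-- fuelled ports still agree there.
def Pre_find_trajectory (map : List (List String)) : Prop :=
  ((∃ r ∈ map, "^" ∈ r) ∧ ∀ r ∈ map, (map.headD []).length ≤ r.length) ∨
  ((∀ r ∈ map, "^" ∉ r) ∧ map ≠ [] ∧ map.headD [] ≠ [])
instance (map : List (List String)) : Decidable (Pre_find_trajectory map) := by
  unfold Pre_find_trajectory; infer_instance

def pvWitness_find_trajectory : List (List String) := [["^", "."], [".", "#"]]

def Spec_find_trajectory (map : List (List String)) (out : Int) : Prop := out = find_trajectory_alt map
instance (map : List (List String)) (out : Int) : Decidable (Spec_find_trajectory map out) := by unfold Spec_find_trajectory; infer_instance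

-- ===== CLAIM (what is proved, stated in full; the proofs are below) =====
def Claim_equal_find_trajectory : Prop := ∀ (map : List (List String)), Dom_find_trajectory map → Pre_find_trajectory map → Spec_find_trajectory map (find_trajectory map)

-- ===== LEMMAS AND PROOFS =====

-- ---------- shared cell/row arithmetic ----------

theorem pvPyGetD_nonneg {α : Type} (xs : List α) (i : Int) (d : α) (h : 0 ≤ i) :
    PySem.List.pyGetD xs i d = xs.getD i.toNat d := by
  obtain ⟨n, rfl⟩ := Int.eq_ofNat_of_zero_le h
  simp

theorem pvGetD_set {α : Type} (l : List α) (a i : Nat) (rv : α) (d : α) :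
    (l.set a rv).getD i d = if a = i ∧ a < l.length then rv else l.getD i d := by
  simp only [List.getD_eq_getElem?_getD, List.getElem?_set]
  split_ifs with h1 h2 h3 <;> simp_all
  omega

theorem pvGet2_nonneg (m : List (List String)) (i j : Int) (hi : 0 ≤ i) (hj : 0 ≤ j) :
    pvGet2 m i j = (m.getD i.toNat []).getD j.toNat "" := by
  unfold pvGet2
  rw [pvPyGetD_nonneg m i [] hi, pvPyGetD_nonneg _ j "" hj]

theorem pvSet2_nonneg (m : List (List String)) (i j : Int) (v : String) (hi : 0 ≤ i) (hj : 0 ≤ j) :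
    pvSet2 m i j v = m.set i.toNat ((m.getD i.toNat []).set j.toNat v) := by
  unfold pvSet2
  rw [PySem.List.pySetD_of_nonneg _ _ hi, pvPyGetD_nonneg m i [] hi,
      PySem.List.pySetD_of_nonneg _ _ hj]

theorem pvCell_set_ne (m : List (List String)) (a b i j : Nat) (v : String)
    (h : ¬(a = i ∧ b = j)) :
    (((m.set a ((m.getD a []).set b v)).getD i []).getD j "") = (m.getD i []).getD j "" := by
  rw [pvGetD_set]
  split_ifs with h1
  · obtain ⟨rfl, _⟩ := h1
    rw [pvGetD_set]
    split_ifs with h2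
    · exact absurd ⟨rfl, h2.1⟩ h
    · rfl
  · rfl

theorem pvCell_set_self (m : List (List String)) (a b : Nat) (v : String)
    (ha : a < m.length) (hb : b < (m.getD a []).length) :
    (((m.set a ((m.getD a []).set b v)).getD a []).getD b "") = v := by
  rw [pvGetD_set]
  split_ifs with h1
  · simp only [List.getD_eq_getElem?_getD, List.getElem?_set]
    split_ifs with h2 <;> simp_all
  · exact absurd ⟨rfl, ha⟩ h1

theorem pvRowlen_set (m : List (List String)) (a b : Nat) (v : String) (i : Nat) :
    ((m.set a ((m.getD a []).set b v)).getD i []).length = (m.getD i []).length := by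
  rw [pvGetD_set]
  split_ifs with h1
  · obtain ⟨rfl, _⟩ := h1
    simp
  · rfl

theorem pvHeadD_eq_getD (m : List (List String)) : m.headD [] = m.getD 0 [] := by
  cases m <;> rfl

-- ---------- stage 1: A's mutating walk tracked by an abstract per-step walk ----------

-- proof-internal per-step walk (one step or turn per fuel unit, visited set instead of marks)
def pvWalkB : Nat → List (List String) → Int → Int → Int → Int → Nat →
    PySem.Set (Int × Int) → PySem.Set (Int × Int)
  | 0, _, _, _, _, _, _, visited => visited
  | Nat.succ fuel, m, h, w, r, c, d, visited =>
    let del := pvDeltas.getD d (0, 0)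
    let nr := r + del.1
    let nc := c + del.2
    if ¬ (0 ≤ nr ∧ nr < h ∧ 0 ≤ nc ∧ nc < w) then visited
    else if pvGet2 m nr nc = "#" ∧ (nr, nc) ∉ visited then
      pvWalkB fuel m h w r c ((d + 1) % 4) visited
    else
      pvWalkB fuel m h w nr nc d (PySem.Set.add visited (nr, nc))

-- the loop invariant tying A's mutated map to the abstract visited set
def pvRel (orig m : List (List String)) (vis : List (Int × Int)) (pr pc : Int) : Prop :=
  m.length = orig.length ∧
  (∀ i : Nat, (m.getD i []).length = (orig.getD i []).length) ∧
  (∀ i j : Nat, ((i : Int), (j : Int)) ∉ vis →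
      (m.getD i []).getD j "" = (orig.getD i []).getD j "") ∧
  (∀ i j : Nat, ((i : Int), (j : Int)) ∈ vis → j < (orig.getD i []).length →
      ¬((i : Int) = pr ∧ (j : Int) = pc) → (m.getD i []).getD j "" = "X") ∧
  (pr, pc) ∈ vis ∧ 0 ≤ pr ∧ 0 ≤ pc

theorem pvNatIntNe (x y : Int) (i j : Nat) (hx : 0 ≤ x) (hy : 0 ≤ y)
    (h : ¬((i : Int) = x ∧ (j : Int) = y)) : ¬(x.toNat = i ∧ y.toNat = j) := by omega

-- a write at the guard's own cell keeps the invariant (cell at (pr,pc) is unconstrained)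
theorem pvRel_set_pos (orig m : List (List String)) (vis : List (Int × Int)) (pr pc : Int)
    (v : String) (h : pvRel orig m vis pr pc) : pvRel orig (pvSet2 m pr pc v) vis pr pc := by
  obtain ⟨hL, hRL, hU, hV, hP, hpr, hpc⟩ := h
  rw [pvSet2_nonneg m pr pc v hpr hpc]
  refine ⟨by simp [hL], fun i => by rw [pvRowlen_set]; exact hRL i, ?_, ?_, hP, hpr, hpc⟩
  · intro i j hnot
    have hne : ¬(pr.toNat = i ∧ pc.toNat = j) := by
      rintro ⟨rfl, rfl⟩
      rw [Int.toNat_of_nonneg hpr, Int.toNat_of_nonneg hpc] at hnot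
      exact hnot hP
    rw [pvCell_set_ne _ _ _ _ _ _ hne]
    exact hU i j hnot
  · intro i j hmem hjl hnpos
    have hne : ¬(pr.toNat = i ∧ pc.toNat = j) := by
      rintro ⟨rfl, rfl⟩
      exact hnpos ⟨Int.toNat_of_nonneg hpr, Int.toNat_of_nonneg hpc⟩
    rw [pvCell_set_ne _ _ _ _ _ _ hne]
    exact hV i j hmem hjl hnpos

-- a move: A writes the direction at next and 'X' at the old cell, the tracker adds next
theorem pvRel_move (orig m : List (List String)) (vis : List (Int × Int)) (pr pc nr nc : Int)
    (v : String) (h : pvRel orig m vis pr pc) (hnr : 0 ≤ nr) (hnc : 0 ≤ nc) :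
    pvRel orig (pvSet2 (pvSet2 m nr nc v) pr pc "X") (PySem.Set.add vis (nr, nc)) nr nc := by
  obtain ⟨hL, hRL, hU, hV, hP, hpr, hpc⟩ := h
  rw [pvSet2_nonneg m nr nc v hnr hnc, pvSet2_nonneg _ pr pc "X" hpr hpc]
  refine ⟨by simp [hL], ?_, ?_, ?_, by simp [PySem.Set.mem_add], hnr, hnc⟩
  · intro i
    rw [pvRowlen_set, pvRowlen_set]
    exact hRL i
  · intro i j hnot
    rw [PySem.Set.mem_add] at hnot
    have hnv : ((i : Int), (j : Int)) ∉ vis := fun hx => hnot (Or.inl hx)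
    have hnn : ((i : Int), (j : Int)) ≠ (nr, nc) := fun hx => hnot (Or.inr hx)
    have hne1 : ¬(pr.toNat = i ∧ pc.toNat = j) := by
      rintro ⟨rfl, rfl⟩
      rw [Int.toNat_of_nonneg hpr, Int.toNat_of_nonneg hpc] at hnv
      exact hnv hP
    have hne2 : ¬(nr.toNat = i ∧ nc.toNat = j) := by
      rintro ⟨rfl, rfl⟩
      rw [Int.toNat_of_nonneg hnr, Int.toNat_of_nonneg hnc] at hnn
      exact hnn rfl
    rw [pvCell_set_ne _ _ _ _ _ _ hne1, pvCell_set_ne _ _ _ _ _ _ hne2]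
    exact hU i j hnv
  · intro i j hmem hjl hnpos
    rw [PySem.Set.mem_add] at hmem
    have hmv : ((i : Int), (j : Int)) ∈ vis := by
      rcases hmem with hmv | heq
      · exact hmv
      · exact absurd ⟨congrArg Prod.fst heq, congrArg Prod.snd heq⟩ hnpos
    have hil : i < orig.length := by
      rcases Nat.lt_or_ge i orig.length with hlt | hge
      · exact hlt
      · rw [List.getD_eq_default _ _ hge] at hjl
        simp at hjl
    have hne2 : ¬(nr.toNat = i ∧ nc.toNat = j) := pvNatIntNe nr nc i j hnr hnc hnpos
    by_cases hold : (i : Int) = pr ∧ (j : Int) = pc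
    · obtain ⟨h1, h2⟩ := hold
      have hpri : pr.toNat = i := by omega
      have hpcj : pc.toNat = j := by omega
      subst hpri hpcj
      apply pvCell_set_self
      · simpa [hL] using hil
      · rw [pvRowlen_set, hRL]
        exact hjl
    · have hne1 : ¬(pr.toNat = i ∧ pc.toNat = j) := pvNatIntNe pr pc i j hpr hpc hold
      rw [pvCell_set_ne _ _ _ _ _ _ hne1, pvCell_set_ne _ _ _ _ _ _ hne2]
      exact hV i j hmv hjl hold

def pvDirChar (d : Nat) : String :=
  if d = 0 then "^" else if d = 1 then ">" else if d = 2 then "v" else "<"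

theorem pvStepA_succ (n : Nat) (m : List (List String)) (pr pc : Int) (d : Nat) (hd : d < 4) :
    pvStepA (n + 1) m pr pc (pvDirChar d) =
      (if ¬ (0 ≤ pr + (pvDeltas.getD d (0, 0)).1 ∧
             pr + (pvDeltas.getD d (0, 0)).1 < (m.length : Int) ∧
             0 ≤ pc + (pvDeltas.getD d (0, 0)).2 ∧
             pc + (pvDeltas.getD d (0, 0)).2 < ((m.headD []).length : Int)) then
        (m, pr, pc)
      else if pvGet2 m (pr + (pvDeltas.getD d (0, 0)).1) (pc + (pvDeltas.getD d (0, 0)).2) = "#" then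
        pvStepA n (pvSet2 m pr pc (pvDirChar ((d + 1) % 4))) pr pc (pvDirChar ((d + 1) % 4))
      else
        pvStepA n
          (pvSet2 (pvSet2 m (pr + (pvDeltas.getD d (0, 0)).1) (pc + (pvDeltas.getD d (0, 0)).2)
            (pvDirChar d)) pr pc "X")
          (pr + (pvDeltas.getD d (0, 0)).1) (pc + (pvDeltas.getD d (0, 0)).2) (pvDirChar d)) := by
  interval_cases d <;>
    simp [pvStepA, pvDirChar, pvDeltas, turn, sub_eq_add_neg]

theorem pvDelta_ne_pos (d : Nat) (hd : d < 4) (pr pc : Int) :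
    ¬(pr + (pvDeltas.getD d (0, 0)).1 = pr ∧ pc + (pvDeltas.getD d (0, 0)).2 = pc) := by
  interval_cases d <;> simp [pvDeltas]

theorem pvWalk_rel (orig : List (List String)) (n : Nat) :
    ∀ (m : List (List String)) (vis : List (Int × Int)) (pr pc : Int) (d : Nat),
      d < 4 → pvRel orig m vis pr pc →
      pvRel orig (pvStepA n m pr pc (pvDirChar d)).1
        (pvWalkB n orig (orig.length : Int) ((orig.headD []).length : Int) pr pc d vis)
        (pvStepA n m pr pc (pvDirChar d)).2.1 (pvStepA n m pr pc (pvDirChar d)).2.2 := by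
  induction n with
  | zero =>
    intro m vis pr pc d hd hrel
    simpa [pvStepA, pvWalkB] using hrel
  | succ n ih =>
    intro m vis pr pc d hd hrel
    obtain ⟨hL, hRL, hU, hV, hP, hpr, hpc⟩ := hrel
    have hW : ((m.headD []).length : Int) = ((orig.headD []).length : Int) := by
      rw [pvHeadD_eq_getD, pvHeadD_eq_getD, hRL 0]
    rw [pvStepA_succ n m pr pc d hd]
    simp only [pvWalkB, hL, hW]
    set nr := pr + (pvDeltas.getD d (0, 0)).1 with hnr
    set nc := pc + (pvDeltas.getD d (0, 0)).2 with hnc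
    by_cases hb : 0 ≤ nr ∧ nr < (orig.length : Int) ∧ 0 ≤ nc ∧ nc < ((orig.headD []).length : Int)
    · obtain ⟨hnr0, hnrH, hnc0, hncW⟩ := hb
      rw [if_neg (not_not_intro ⟨hnr0, hnrH, hnc0, hncW⟩),
          if_neg (not_not_intro ⟨hnr0, hnrH, hnc0, hncW⟩)]
      have hnepos : ¬(nr = pr ∧ nc = pc) := pvDelta_ne_pos d hd pr pc
      have hAB : (pvGet2 m nr nc = "#") ↔ (pvGet2 orig nr nc = "#" ∧ (nr, nc) ∉ vis) := by
        have hcast : ((nr.toNat : Int), (nc.toNat : Int)) = (nr, nc) := by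
          rw [Int.toNat_of_nonneg hnr0, Int.toNat_of_nonneg hnc0]
        by_cases hv : (nr, nc) ∈ vis
        · rw [pvGet2_nonneg m nr nc hnr0 hnc0]
          by_cases hcl : nc.toNat < (orig.getD nr.toNat []).length
          · rw [hV nr.toNat nc.toNat (hcast ▸ hv) hcl
              (by rintro ⟨h1, h2⟩; exact hnepos ⟨by omega, by omega⟩)]
            simp [hv]
          · rw [List.getD_eq_default _ _ (by rw [hRL]; omega)]
            simp [hv]
        · rw [pvGet2_nonneg m nr nc hnr0 hnc0, hU nr.toNat nc.toNat (hcast ▸ hv),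
              ← pvGet2_nonneg orig nr nc hnr0 hnc0]
          simp [hv]
      by_cases hsharp : pvGet2 orig nr nc = "#" ∧ (nr, nc) ∉ vis
      · rw [if_pos (hAB.mpr hsharp), if_pos hsharp]
        exact ih _ _ _ _ _ (by omega)
          (pvRel_set_pos orig m vis pr pc _ ⟨hL, hRL, hU, hV, hP, hpr, hpc⟩)
      · rw [if_neg (fun hx => hsharp (hAB.mp hx)), if_neg hsharp]
        exact ih _ _ _ _ _ hd
          (pvRel_move orig m vis pr pc nr nc _ ⟨hL, hRL, hU, hV, hP, hpr, hpc⟩ hnr0 hnc0)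
    · rw [if_pos hb, if_pos hb]
      exact ⟨hL, hRL, hU, hV, hP, hpr, hpc⟩

theorem pvFindStart_eq (rs : List (List String)) :
    ∀ i : Int, pvFindStartA rs i = pvFindStartB (PySem.List.enumerate rs i) := by
  induction rs with
  | nil => intro i; rfl
  | cons r t ih =>
    intro i
    rw [PySem.List.enumerate_cons]
    simp only [pvFindStartA, pvFindStartB]
    split_ifs with h
    · rfl
    · exact ih (i + 1)

theorem pvRel_init (orig : List (List String)) (pos : Int × Int)
    (h1 : 0 ≤ pos.1) (h2 : 0 ≤ pos.2) : pvRel orig orig [pos] pos.1 pos.2 := by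
  refine ⟨rfl, fun _ => rfl, fun _ _ _ => rfl, ?_, by simp, h1, h2⟩
  intro i j hmem hjl hnpos
  simp only [List.mem_singleton] at hmem
  exact absurd ⟨congrArg Prod.fst hmem, congrArg Prod.snd hmem⟩ hnpos

-- ---------- counting: 'X'-marks of a map against a visited set ----------

theorem pvRow_count (vis : List (Int × Int)) (iIdx : Int) :
    ∀ (ra rb : List String) (s : Int),
    ra.length = rb.length →
    (∀ j : Nat, j < rb.length → (ra.getD j "" = "X" ↔ ((iIdx, s + (j : Int)) ∈ vis ∨ rb.getD j "" = "X"))) →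
    ((PySem.List.count ra "X" : Nat) : Int)
      = ((PySem.List.enumerate rb s).map
          (fun q => if (iIdx, q.1) ∈ vis ∨ q.2 = "X" then (1 : Int) else 0)).sum := by
  intro ra
  induction ra with
  | nil =>
    intro rb s hlen _
    have : rb = [] := List.eq_nil_of_length_eq_zero hlen.symm
    subst this
    simp [PySem.List.count_eq, PySem.List.enumerate]
  | cons x t ih =>
    intro rb s hlen hpt
    cases rb with
    | nil => simp at hlen
    | cons y u =>
      rw [PySem.List.enumerate_cons]
      simp only [List.map_cons, List.sum_cons]
      have h0 := hpt 0 (by simp)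
      simp only [List.getD_cons_zero, Nat.cast_zero, add_zero] at h0
      have ht : ∀ j : Nat, j < u.length →
          (t.getD j "" = "X" ↔ ((iIdx, (s + 1) + (j : Int)) ∈ vis ∨ u.getD j "" = "X")) := by
        intro j hj
        have := hpt (j + 1) (by simpa using Nat.succ_lt_succ hj)
        simpa [add_assoc, add_comm, add_left_comm] using this
      rw [PySem.List.count_eq, List.count_cons]
      push_cast
      rw [← PySem.List.count_eq, ih u (s + 1) (by simpa using hlen) ht]
      have hhead : (if (x == "X") = true then (1 : Int) else 0)
           = (if (iIdx, s) ∈ vis ∨ y = "X" then (1 : Int) else 0) := by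
        by_cases hx : x = "X"
        · rw [if_pos (by simp [hx]), if_pos (h0.mp hx)]
        · rw [if_neg (by simpa using hx), if_neg (fun h => hx (h0.mpr h))]
      rw [hhead]
      ring

theorem pvMat_count_sum (vis : List (Int × Int)) :
    ∀ (ma mb : List (List String)) (s : Int),
    ma.length = mb.length →
    (∀ k : Nat, k < mb.length →
       (ma.getD k []).length = (mb.getD k []).length ∧
       ∀ j : Nat, j < (mb.getD k []).length →
         ((ma.getD k []).getD j "" = "X" ↔
           ((s + (k : Int), (j : Int)) ∈ vis ∨ (mb.getD k []).getD j "" = "X"))) →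
    (ma.map (fun row => ((PySem.List.count row "X" : Nat) : Int))).sum
      = ((PySem.List.enumerate mb s).map
          (fun p => ((PySem.List.enumerate p.2).map
            (fun q => if (p.1, q.1) ∈ vis ∨ q.2 = "X" then (1 : Int) else 0)).sum)).sum := by
  intro ma
  induction ma with
  | nil =>
    intro mb s hlen _
    have : mb = [] := List.eq_nil_of_length_eq_zero hlen.symm
    subst this
    simp [PySem.List.enumerate]
  | cons r t ih =>
    intro mb s hlen hpt
    cases mb with
    | nil => simp at hlen
    | cons rb u =>
      rw [PySem.List.enumerate_cons]
      simp only [List.map_cons, List.sum_cons]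
      have h0 := hpt 0 (by simp)
      simp only [List.getD_cons_zero, Nat.cast_zero, add_zero] at h0
      have hhead := pvRow_count vis s r rb 0 h0.1
        (by intro j hj; simpa using h0.2 j hj)
      have htail : ∀ k : Nat, k < u.length →
          (t.getD k []).length = (u.getD k []).length ∧
          ∀ j : Nat, j < (u.getD k []).length →
            ((t.getD k []).getD j "" = "X" ↔
              (((s + 1) + (k : Int), (j : Int)) ∈ vis ∨ (u.getD k []).getD j "" = "X")) := by
        intro k hk
        have := hpt (k + 1) (by simpa using Nat.succ_lt_succ hk)
        simpa [add_assoc, add_comm, add_left_comm] using this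
      rw [hhead, ih u (s + 1) (by simpa using hlen) htail]

-- the shared right-hand counting formula
def pvCountFormula (mb : List (List String)) (vis : List (Int × Int)) : Int :=
  ((PySem.List.enumerate mb).map
    (fun p => ((PySem.List.enumerate p.2).map
      (fun q => if (p.1, q.1) ∈ vis ∨ q.2 = "X" then (1 : Int) else 0)).sum)).sum

theorem pvRel_count (orig m : List (List String)) (vis : List (Int × Int)) (pr pc : Int)
    (hrel : pvRel orig m vis pr pc) :
    (pvSet2 m pr pc "X").foldl (fun acc row => acc + ((PySem.List.count row "X" : Nat) : Int)) 0
      = pvCountFormula orig vis := by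
  obtain ⟨hL, hRL, hU, hV, hP, hpr, hpc⟩ := hrel
  rw [PySem.List.foldl_add]
  simp only [zero_add, pvCountFormula]
  rw [pvSet2_nonneg m pr pc "X" hpr hpc]
  apply pvMat_count_sum vis _ orig 0
  · simp [hL]
  · intro k hk
    refine ⟨by rw [pvRowlen_set]; exact hRL k, ?_⟩
    intro j hj
    simp only [zero_add]
    by_cases hvv : ((k : Int), (j : Int)) ∈ vis
    · simp only [hvv, true_or, iff_true]
      by_cases hpos : (k : Int) = pr ∧ (j : Int) = pc
      · have hk1 : pr.toNat = k := by omega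
        have hk2 : pc.toNat = j := by omega
        subst hk1
        subst hk2
        apply pvCell_set_self
        · simpa [hL] using hk
        · rw [hRL]
          exact hj
      · rw [pvCell_set_ne _ _ _ _ _ _ (pvNatIntNe pr pc k j hpr hpc hpos)]
        exact hV k j hvv hj hpos
    · rw [pvCell_set_ne _ _ _ _ _ _
        (by rintro ⟨rfl, rfl⟩
            rw [Int.toNat_of_nonneg hpr, Int.toNat_of_nonneg hpc] at hvv
            exact hvv hP),
        hU k j hvv]
      simp [hvv]

-- ---------- stage 3: B's marking loop against the same counting formula ----------

theorem pvMarked_spec :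
    ∀ (vis : List (Int × Int)) (m : List (List String)),
    (∀ p ∈ vis, 0 ≤ p.1 ∧ p.1.toNat < m.length ∧ 0 ≤ p.2 ∧
        p.2.toNat < (m.getD p.1.toNat []).length) →
    (vis.foldl (fun mm p => pvSet2 mm p.1 p.2 "X") m).length = m.length ∧
    (∀ i : Nat, ((vis.foldl (fun mm p => pvSet2 mm p.1 p.2 "X") m).getD i []).length
        = (m.getD i []).length) ∧
    (∀ i j : Nat, ((vis.foldl (fun mm p => pvSet2 mm p.1 p.2 "X") m).getD i []).getD j ""
        = if ((i : Int), (j : Int)) ∈ vis then "X" else (m.getD i []).getD j "") := by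
  intro vis
  induction vis with
  | nil =>
    intro m _
    refine ⟨rfl, fun _ => rfl, fun i j => ?_⟩
    simp
  | cons p rest ih =>
    intro m hb
    obtain ⟨hp1, hp2, hp3, hp4⟩ := hb p (List.mem_cons_self)
    have hset := pvSet2_nonneg m p.1 p.2 "X" hp1 hp3
    have hb' : ∀ q ∈ rest, 0 ≤ q.1 ∧ q.1.toNat < (pvSet2 m p.1 p.2 "X").length ∧ 0 ≤ q.2 ∧
        q.2.toNat < ((pvSet2 m p.1 p.2 "X").getD q.1.toNat []).length := by
      intro q hq
      obtain ⟨h1, h2, h3, h4⟩ := hb q (List.mem_cons_of_mem _ hq)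
      rw [hset]
      refine ⟨h1, by simpa using h2, h3, by rw [pvRowlen_set]; exact h4⟩
    obtain ⟨ihL, ihR, ihC⟩ := ih (pvSet2 m p.1 p.2 "X") hb'
    simp only [List.foldl_cons]
    refine ⟨by rw [ihL, hset]; simp, fun i => by rw [ihR i, hset, pvRowlen_set], ?_⟩
    intro i j
    rw [ihC i j]
    by_cases hr : ((i : Int), (j : Int)) ∈ rest
    · rw [if_pos hr, if_pos (List.mem_cons_of_mem _ hr)]
    · rw [if_neg hr, hset]
      by_cases hpe : ((i : Int), (j : Int)) = p
      · have hi : p.1.toNat = i := by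
          have := congrArg Prod.fst hpe; simp at this; omega
        have hj : p.2.toNat = j := by
          have := congrArg Prod.snd hpe; simp at this; omega
        rw [if_pos (by rw [hpe]; exact List.mem_cons_self)]
        subst hi; subst hj
        exact pvCell_set_self m _ _ "X" hp2 hp4
      · rw [if_neg (by simp [hpe, hr])]
        apply pvCell_set_ne
        rintro ⟨rfl, rfl⟩
        exact hpe (by simp [Int.toNat_of_nonneg hp1, Int.toNat_of_nonneg hp3])

theorem pvMarked_count (m : List (List String)) (vis : List (Int × Int))
    (hb : ∀ p ∈ vis, 0 ≤ p.1 ∧ p.1.toNat < m.length ∧ 0 ≤ p.2 ∧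
        p.2.toNat < (m.getD p.1.toNat []).length) :
    ((vis.foldl (fun mm p => pvSet2 mm p.1 p.2 "X") m).map
        (fun row => ((PySem.List.count row "X" : Nat) : Int))).sum
      = pvCountFormula m vis := by
  obtain ⟨hL, hR, hC⟩ := pvMarked_spec vis m hb
  unfold pvCountFormula
  apply pvMat_count_sum vis _ m 0
  · exact hL
  · intro k hk
    refine ⟨hR k, ?_⟩
    intro j hj
    rw [hC k j]
    simp only [zero_add]
    by_cases hv : ((k : Int), (j : Int)) ∈ vis
    · simp [hv]
    · simp [hv]

-- ---------- stage 2: per-step walk equals the segment walk ----------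

-- the cells a straight run of n steps from (r,c) adds, in step order
def pvAddSeg (n : Nat) (r c dr dc : Int) (vis : PySem.Set (Int × Int)) : PySem.Set (Int × Int) :=
  (List.range n).foldl
    (fun v (k : Nat) => PySem.Set.add v (r + ((k : Int) + 1) * dr, c + ((k : Int) + 1) * dc)) vis

theorem pvAddSeg_shift (n : Nat) (r c dr dc : Int) (vis : PySem.Set (Int × Int)) :
    pvAddSeg (n + 1) r c dr dc vis
      = pvAddSeg n (r + dr) (c + dc) dr dc (PySem.Set.add vis (r + dr, c + dc)) := by
  unfold pvAddSeg
  rw [List.range_succ_eq_map]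
  simp only [List.foldl_cons, List.foldl_map, Nat.cast_zero, zero_add, one_mul]
  apply PySem.List.foldl_congr_mem
  intro acc k _
  have h1 : r + ((Nat.succ k : Int) + 1) * dr = r + dr + ((k : Int) + 1) * dr := by push_cast; ring
  have h2 : c + ((Nat.succ k : Int) + 1) * dc = c + dc + ((k : Int) + 1) * dc := by push_cast; ring
  rw [h1, h2]

theorem pvAddSeg_succ (n : Nat) (r c dr dc : Int) (vis : PySem.Set (Int × Int)) :
    pvAddSeg (n + 1) r c dr dc vis
      = PySem.Set.add (pvAddSeg n r c dr dc vis)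
          (r + ((n : Int) + 1) * dr, c + ((n : Int) + 1) * dc) := by
  unfold pvAddSeg
  rw [List.range_succ, List.foldl_append]
  rfl

theorem pvAddSeg_mem (n : Nat) (r c dr dc : Int) (vis : PySem.Set (Int × Int)) (p : Int × Int) :
    p ∈ pvAddSeg n r c dr dc vis →
      p ∈ vis ∨ ∃ k : Nat, k < n ∧ p = (r + ((k : Int) + 1) * dr, c + ((k : Int) + 1) * dc) := by
  induction n with
  | zero => intro h; exact Or.inl h
  | succ n ih =>
    intro h
    rw [pvAddSeg_succ, PySem.Set.mem_add] at h
    rcases h with h | h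
    · rcases ih h with h' | ⟨k, hk, hp⟩
      · exact Or.inl h'
      · exact Or.inr ⟨k, by omega, hp⟩
    · exact Or.inr ⟨n, by omega, h⟩

-- B's range-add loop is pvAddSeg
theorem pvRangeFold_eq_addSeg (n : Nat) (r c dr dc : Int) (vis : PySem.Set (Int × Int)) :
    (PySem.List.pyRange 1 ((n : Int) + 1) 1).foldl
        (fun v k => PySem.Set.add v (r + k * dr, c + k * dc)) vis
      = pvAddSeg n r c dr dc vis := by
  have hr : PySem.List.pyRange 1 ((n : Int) + 1) 1
      = (List.range n).map (fun (k : Nat) => ((k : Int) + 1)) := by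
    induction n with
    | zero => rfl
    | succ n ih =>
      have h1 : ((n + 1 : Nat) : Int) + 1 = ((n : Int) + 1) + 1 := by push_cast; ring
      rw [h1, PySem.List.pyRange_one_succ_right (by omega), ih, List.range_succ, List.map_append]
      simp
  rw [hr, List.foldl_map]
  rfl

-- ---------- the obstacle index read back ----------

theorem pvRowObst_mem (m : List (List String)) (r j : Int) (hr0 : 0 ≤ r) :
    j ∈ PySem.List.pyGetD (pvRowObst m) r [] ↔
      0 ≤ j ∧ j.toNat < (m.getD r.toNat []).length ∧
        (m.getD r.toNat []).getD j.toNat "" = "#" := by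
  unfold pvRowObst
  rw [pvPyGetD_nonneg _ r [] hr0]
  by_cases hk : r.toNat < m.length
  · have h1 : (m.map (fun row => ((PySem.List.enumerate row 0).filter (fun q => q.2 == "#")).map (fun q => q.1))).getD r.toNat []
        = ((PySem.List.enumerate (m.getD r.toNat []) 0).filter (fun q => q.2 == "#")).map (fun q => q.1) := by
      rw [List.getD_eq_getElem _ _ (by simpa using hk), List.getElem_map,
          List.getD_eq_getElem _ _ hk]
    rw [h1]
    set row := m.getD r.toNat []
    simp only [List.mem_map, List.mem_filter, PySem.List.mem_enumerate_iff]
    constructor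
    · rintro ⟨q, ⟨⟨k, hkl, rfl⟩, hsharp⟩, rfl⟩
      simp only [beq_iff_eq] at hsharp
      refine ⟨by omega, by simpa using hkl, ?_⟩
      rw [show (((0 : Int) + (k : Int)).toNat) = k by omega, List.getD_eq_getElem _ _ hkl]
      exact hsharp
    · rintro ⟨hj0, hjl, hsharp⟩
      refine ⟨((j.toNat : Int), row[j.toNat]), ⟨⟨j.toNat, hjl, by simp⟩, ?_⟩, by simp; omega⟩
      simp only [beq_iff_eq]
      rw [← List.getD_eq_getElem _ _ hjl]
      exact hsharp
  · rw [List.getD_eq_default _ _ (by simpa using Nat.le_of_not_lt hk),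
        List.getD_eq_default _ _ (Nat.le_of_not_lt hk)]
    simp

-- proof-side column test: row has an obstacle in column c
def pvObstB (row : List String) (c : Int) : Bool :=
  decide (0 ≤ c ∧ c.toNat < row.length ∧ row.getD c.toNat "" = "#")

theorem pvColInner (i : Int) :
    ∀ (row : List String) (s : Int) (d2 : PySem.Dict Int (List Int)) (c : Int),
    ((PySem.List.enumerate row s).foldl
        (fun d2 q => if q.2 = "#" then d2.insert q.1 (d2.getD q.1 [] ++ [i]) else d2) d2).getD c []
      = d2.getD c [] ++
        (if s ≤ c ∧ c < s + (row.length : Int) ∧ row.getD (c - s).toNat "" = "#" then [i] else []) := by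
  intro row
  induction row with
  | nil =>
    intro s d2 c
    have h0 : (if s ≤ c ∧ c < s + (([] : List String).length : Int) ∧
        ([] : List String).getD (c - s).toNat "" = "#" then [i] else ([] : List Int)) = [] :=
      if_neg (by rintro ⟨h1, h2, _⟩; simp at h2; omega)
    rw [h0]
    simp [PySem.List.enumerate]
  | cons x t ih =>
    intro s d2 c
    rw [PySem.List.enumerate_cons, List.foldl_cons]
    dsimp only
    by_cases hx : x = "#"
    · rw [if_pos hx, ih (s + 1) _ c, PySem.Dict.getD_insert]
      by_cases hcs : c = s
      · subst hcs
        have ht : (if c + 1 ≤ c ∧ c < c + 1 + (t.length : Int) ∧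
            t.getD (c - (c + 1)).toNat "" = "#" then [i] else ([] : List Int)) = [] :=
          if_neg (by rintro ⟨h1, _, _⟩; omega)
        have hh : (if c ≤ c ∧ c < c + ((x :: t).length : Int) ∧
            (x :: t).getD (c - c).toNat "" = "#" then [i] else ([] : List Int)) = [i] :=
          if_pos ⟨le_refl c, by simp only [List.length_cons]; push_cast; omega,
            by rw [show ((c - c).toNat) = 0 by omega, List.getD_cons_zero]; exact hx⟩
        rw [ht, hh, if_pos rfl]
        simp
      · have hiff : (s + 1 ≤ c ∧ c < s + 1 + (t.length : Int) ∧ t.getD (c - (s + 1)).toNat "" = "#")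
            ↔ (s ≤ c ∧ c < s + ((x :: t).length : Int) ∧ (x :: t).getD (c - s).toNat "" = "#") := by
          constructor
          · rintro ⟨h1, h2, h3⟩
            refine ⟨by omega, by simp only [List.length_cons] at h2 ⊢; push_cast at h2 ⊢; omega, ?_⟩
            rw [show ((c - s).toNat) = (c - (s + 1)).toNat + 1 by omega, List.getD_cons_succ]
            exact h3
          · rintro ⟨h1, h2, h3⟩
            have h1' : s + 1 ≤ c := by
              rcases lt_or_eq_of_le h1 with h | h
              · omega
              · exact absurd h.symm hcs
            refine ⟨h1', by simp only [List.length_cons] at h2 ⊢; push_cast at h2 ⊢; omega, ?_⟩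
            rw [show ((c - s).toNat) = (c - (s + 1)).toNat + 1 by omega,
              List.getD_cons_succ] at h3
            exact h3
        rw [if_neg hcs, if_congr hiff rfl rfl]
    · rw [if_neg hx, ih (s + 1) _ c]
      congr 1
      apply if_congr _ rfl rfl
      constructor
      · rintro ⟨h1, h2, h3⟩
        refine ⟨by omega, by simp only [List.length_cons] at h2 ⊢; push_cast at h2 ⊢; omega, ?_⟩
        rw [show ((c - s).toNat) = (c - (s + 1)).toNat + 1 by omega, List.getD_cons_succ]
        exact h3
      · rintro ⟨h1, h2, h3⟩
        have h1' : s + 1 ≤ c := by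
          rcases lt_or_eq_of_le h1 with h | h
          · omega
          · exfalso
            apply hx
            rw [show ((c - s).toNat) = 0 by omega, List.getD_cons_zero] at h3
            exact h3
        refine ⟨h1', by simp only [List.length_cons] at h2 ⊢; push_cast at h2 ⊢; omega, ?_⟩
        rw [show ((c - s).toNat) = (c - (s + 1)).toNat + 1 by omega, List.getD_cons_succ] at h3
        exact h3

theorem pvColOuter (c : Int) :
    ∀ (rows : List (Int × List String)) (dd : PySem.Dict Int (List Int)),
    ((rows.foldl
        (fun d p => (PySem.List.enumerate p.2 0).foldl
          (fun d2 q => if q.2 = "#" then d2.insert q.1 (d2.getD q.1 [] ++ [p.1]) else d2) d) dd).getD c [])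
      = dd.getD c [] ++ (rows.filter (fun p => pvObstB p.2 c)).map (fun p => p.1) := by
  intro rows
  induction rows with
  | nil => intro dd; simp
  | cons p t ih =>
    intro dd
    rw [List.foldl_cons, ih, pvColInner p.1 p.2 0 dd c]
    have hcond : (0 ≤ c ∧ c < 0 + (p.2.length : Int) ∧ p.2.getD (c - 0).toNat "" = "#")
        ↔ pvObstB p.2 c = true := by
      unfold pvObstB
      rw [decide_eq_true_iff]
      constructor
      · rintro ⟨h1, h2, h3⟩; exact ⟨h1, by omega, by simpa using h3⟩
      · rintro ⟨h1, h2, h3⟩; exact ⟨h1, by omega, by simpa using h3⟩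
    by_cases hob : pvObstB p.2 c = true
    · have h1 : (if 0 ≤ c ∧ c < 0 + (p.2.length : Int) ∧ p.2.getD (c - 0).toNat "" = "#"
          then [p.1] else ([] : List Int)) = [p.1] := if_pos (hcond.mpr hob)
      rw [h1]
      simp [hob]
    · have h1 : (if 0 ≤ c ∧ c < 0 + (p.2.length : Int) ∧ p.2.getD (c - 0).toNat "" = "#"
          then [p.1] else ([] : List Int)) = [] := if_neg (fun hx => hob (hcond.mp hx))
      rw [h1]
      simp [hob]

theorem pvColObst_mem (m : List (List String)) (i c : Int) :
    i ∈ (pvColObst m).getD c [] ↔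
      0 ≤ i ∧ i.toNat < m.length ∧ 0 ≤ c ∧ c.toNat < (m.getD i.toNat []).length ∧
        (m.getD i.toNat []).getD c.toNat "" = "#" := by
  unfold pvColObst
  rw [pvColOuter c (PySem.List.enumerate m 0) PySem.Dict.empty, PySem.Dict.getD_empty]
  simp only [List.nil_append, List.mem_map, List.mem_filter, PySem.List.mem_enumerate_iff]
  constructor
  · rintro ⟨q, ⟨⟨k, hk, rfl⟩, hob⟩, rfl⟩
    unfold pvObstB at hob
    rw [decide_eq_true_iff] at hob
    obtain ⟨h1, h2, h3⟩ := hob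
    dsimp only at h1 h2 h3 ⊢
    have hk0 : ((0 : Int) + (k : Int)).toNat = k := by omega
    rw [hk0, List.getD_eq_getElem _ _ hk]
    exact ⟨by omega, by omega, h1, h2, h3⟩
  · rintro ⟨h0, h1, h2, h3, h4⟩
    refine ⟨((i.toNat : Int), m[i.toNat]'h1), ⟨⟨i.toNat, h1, by simp⟩, ?_⟩, by dsimp only; omega⟩
    unfold pvObstB
    rw [decide_eq_true_iff]
    dsimp only
    rw [List.getD_eq_getElem _ _ h1] at h3 h4
    exact ⟨h2, h3, h4⟩

-- running the per-step walk down a free corridor of length n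
theorem pvWalkB_run (m : List (List String)) (H W : Int) (d : Nat) :
    ∀ (n fuel : Nat) (r c : Int) (vis : PySem.Set (Int × Int)),
    (∀ k : Nat, k < n →
        (0 ≤ r + ((k : Int) + 1) * (pvDeltas.getD d (0, 0)).1 ∧
         r + ((k : Int) + 1) * (pvDeltas.getD d (0, 0)).1 < H ∧
         0 ≤ c + ((k : Int) + 1) * (pvDeltas.getD d (0, 0)).2 ∧
         c + ((k : Int) + 1) * (pvDeltas.getD d (0, 0)).2 < W) ∧
        pvGet2 m (r + ((k : Int) + 1) * (pvDeltas.getD d (0, 0)).1)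
          (c + ((k : Int) + 1) * (pvDeltas.getD d (0, 0)).2) ≠ "#") →
    pvWalkB fuel m H W r c d vis =
      if fuel ≤ n then
        pvAddSeg fuel r c (pvDeltas.getD d (0, 0)).1 (pvDeltas.getD d (0, 0)).2 vis
      else
        pvWalkB (fuel - n) m H W (r + (n : Int) * (pvDeltas.getD d (0, 0)).1)
          (c + (n : Int) * (pvDeltas.getD d (0, 0)).2) d
          (pvAddSeg n r c (pvDeltas.getD d (0, 0)).1 (pvDeltas.getD d (0, 0)).2 vis) := by
  set dr := (pvDeltas.getD d (0, 0)).1 with hdr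
  set dc := (pvDeltas.getD d (0, 0)).2 with hdc
  intro n
  induction n with
  | zero =>
    intro fuel r c vis _
    by_cases hf : fuel ≤ 0
    · interval_cases fuel
      simp [pvWalkB, pvAddSeg]
    · rw [if_neg hf]
      simp [pvAddSeg]
  | succ n ih =>
    intro fuel r c vis hfree
    match fuel with
    | 0 =>
      rw [if_pos (by omega)]
      simp [pvWalkB, pvAddSeg]
    | Nat.succ f =>
      obtain ⟨hin0, hsh0⟩ := hfree 0 (by omega)
      simp only [Nat.cast_zero, zero_add, one_mul] at hin0 hsh0
      have hstep : pvWalkB (Nat.succ f) m H W r c d vis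
          = pvWalkB f m H W (r + dr) (c + dc) d (PySem.Set.add vis (r + dr, c + dc)) := by
        simp only [pvWalkB, ← hdr, ← hdc]
        rw [if_neg (not_not_intro hin0), if_neg (by simp [hsh0])]
      rw [hstep]
      have hfree' : ∀ k : Nat, k < n →
          ((0 ≤ (r + dr) + ((k : Int) + 1) * dr ∧ (r + dr) + ((k : Int) + 1) * dr < H ∧
            0 ≤ (c + dc) + ((k : Int) + 1) * dc ∧ (c + dc) + ((k : Int) + 1) * dc < W) ∧
           pvGet2 m ((r + dr) + ((k : Int) + 1) * dr) ((c + dc) + ((k : Int) + 1) * dc) ≠ "#") := by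
        intro k hk
        have h := hfree (k + 1) (by omega)
        have e1 : r + (((k + 1 : Nat) : Int) + 1) * dr = (r + dr) + ((k : Int) + 1) * dr := by
          push_cast; ring
        have e2 : c + (((k + 1 : Nat) : Int) + 1) * dc = (c + dc) + ((k : Int) + 1) * dc := by
          push_cast; ring
        rw [e1, e2] at h
        exact h
      rw [ih f (r + dr) (c + dc) (PySem.Set.add vis (r + dr, c + dc)) hfree']
      by_cases hf : f ≤ n
      · rw [if_pos hf, if_pos (by omega)]
        have : ∀ j : Nat, j ≤ n → pvAddSeg j (r + dr) (c + dc) dr dc (PySem.Set.add vis (r + dr, c + dc))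
            = pvAddSeg (j + 1) r c dr dc vis := fun j _ => (pvAddSeg_shift j r c dr dc vis).symm
        exact this f hf
      · rw [if_neg hf, if_neg (by omega)]
        have e1 : (r + dr) + (n : Int) * dr = r + ((n + 1 : Nat) : Int) * dr := by push_cast; ring
        have e2 : (c + dc) + (n : Int) * dc = c + ((n + 1 : Nat) : Int) * dc := by push_cast; ring
        have e3 : f - n = Nat.succ f - (n + 1) := by omega
        rw [e1, e2, ← pvAddSeg_shift, ← e3]


theorem pvMinD (lst : List Int) (wall : Int) :
    ((PySem.List.min? (lst ++ [wall]) (fun t => t)).getD 0 ∈ lst ∨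
      (PySem.List.min? (lst ++ [wall]) (fun t => t)).getD 0 = wall) ∧
    (PySem.List.min? (lst ++ [wall]) (fun t => t)).getD 0 ≤ wall ∧
    (∀ t ∈ lst, (PySem.List.min? (lst ++ [wall]) (fun t => t)).getD 0 ≤ t) := by
  cases h : PySem.List.min? (lst ++ [wall]) (fun t => t) with
  | none =>
    rw [PySem.List.min?_eq_none_iff] at h
    simp at h
  | some s =>
    have hmem := PySem.List.min?_mem h
    have hmin := PySem.List.min?_isMin h
    simp only [Option.getD_some]
    rw [List.mem_append] at hmem
    refine ⟨?_, hmin wall (by simp), fun t ht => hmin t (List.mem_append_left _ ht)⟩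
    rcases hmem with h' | h'
    · exact Or.inl h'
    · simp at h'
      exact Or.inr h'

theorem pvColObst_cell (m : List (List String)) (i c : Int) (h0 : 0 ≤ i) (hc : 0 ≤ c) :
    i ∈ (pvColObst m).getD c [] ↔ pvGet2 m i c = "#" := by
  rw [pvColObst_mem, pvGet2_nonneg m i c h0 hc]
  constructor
  · rintro ⟨_, _, _, _, h⟩
    exact h
  · intro h
    have h1 : i.toNat < m.length := by
      by_contra hx
      rw [List.getD_eq_default m _ (by omega)] at h
      simp at h
    have h2 : c.toNat < (m.getD i.toNat []).length := by
      by_contra hx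
      rw [List.getD_eq_default (m.getD i.toNat []) _ (by omega)] at h
      simp at h
    exact ⟨h0, h1, hc, h2, h⟩

theorem pvRowObst_cell (m : List (List String)) (r j : Int) (hr0 : 0 ≤ r) (hj : 0 ≤ j) :
    j ∈ PySem.List.pyGetD (pvRowObst m) r [] ↔ pvGet2 m r j = "#" := by
  rw [pvRowObst_mem m r j hr0, pvGet2_nonneg m r j hr0 hj]
  constructor
  · rintro ⟨_, _, h⟩
    exact h
  · intro h
    have h2 : j.toNat < (m.getD r.toNat []).length := by
      by_contra hx
      rw [List.getD_eq_default (m.getD r.toNat []) _ (by omega)] at h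
      simp at h
    exact ⟨hj, h2, h⟩

theorem pvStepFacts (m : List (List String)) (r c : Int) (d : Nat) (hd : d < 4)
    (hr0 : 0 ≤ r) (hrH : r < (m.length : Int)) (hc0 : 0 ≤ c)
    (hcW : c < ((m.headD []).length : Int)) :
    ∀ (del : Int × Int) (dists : List Int) (wall step : Int),
    del = pvDeltas.getD d (0, 0) →
    dists = (if del.1 ≠ 0 then ((pvColObst m).getD c []).map (fun i => (i - r) * del.1)
             else (PySem.List.pyGetD (pvRowObst m) r []).map (fun j => (j - c) * del.2)) →
    wall = (if del.1 ≠ 0 then (if del.1 < 0 then r + 1 else (m.length : Int) - r)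
            else (if del.2 < 0 then c + 1 else ((m.headD []).length : Int) - c)) →
    step = (PySem.List.min? (dists.filter (fun t => decide (0 < t)) ++ [wall]) (fun t => t)).getD 0 →
    1 ≤ step ∧ step ≤ wall ∧
    (∀ k : Int, 0 < k → k < step →
      (0 ≤ r + k * del.1 ∧ r + k * del.1 < (m.length : Int) ∧
       0 ≤ c + k * del.2 ∧ c + k * del.2 < ((m.headD []).length : Int)) ∧
      pvGet2 m (r + k * del.1) (c + k * del.2) ≠ "#") ∧
    (step = wall → ¬(0 ≤ r + step * del.1 ∧ r + step * del.1 < (m.length : Int) ∧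
       0 ≤ c + step * del.2 ∧ c + step * del.2 < ((m.headD []).length : Int))) ∧
    (step < wall → (0 ≤ r + step * del.1 ∧ r + step * del.1 < (m.length : Int) ∧
       0 ≤ c + step * del.2 ∧ c + step * del.2 < ((m.headD []).length : Int)) ∧
      pvGet2 m (r + step * del.1) (c + step * del.2) = "#") := by
  intro del dists wall step hdel hdists hwall hstep
  have hmin := pvMinD (dists.filter (fun t => decide (0 < t))) wall
  rw [← hstep] at hmin
  obtain ⟨hsm, hsw, hsle⟩ := hmin
  have hpos : ∀ t ∈ dists.filter (fun t => decide (0 < t)), 0 < t := by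
    intro t ht
    have := List.of_mem_filter ht
    simpa using this
  have hnd : ∀ k : Int, 0 < k → k < step → k ∉ dists := by
    intro k hk0 hks hm
    have := hsle k (List.mem_filter.mpr ⟨hm, by simpa using hk0⟩)
    omega
  have hsd : step < wall → step ∈ dists := by
    intro hlt
    rcases hsm with h | h
    · exact (List.mem_filter.mp h).1
    · omega
  have hwall1 : 1 ≤ wall := by
    subst hdel hwall
    interval_cases d
    · rw [show pvDeltas.getD 0 (0, 0) = (-1, 0) from rfl, if_pos (by norm_num),
          if_pos (by norm_num)]
      omega
    · rw [show pvDeltas.getD 1 (0, 0) = (0, 1) from rfl, if_neg (by norm_num),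
          if_neg (by norm_num)]
      omega
    · rw [show pvDeltas.getD 2 (0, 0) = (1, 0) from rfl, if_pos (by norm_num),
          if_neg (by norm_num)]
      omega
    · rw [show pvDeltas.getD 3 (0, 0) = (0, -1) from rfl, if_neg (by norm_num),
          if_pos (by norm_num)]
      omega
  have h1le : 1 ≤ step := by
    rcases hsm with h | h
    · exact hpos _ h
    · omega
  refine ⟨h1le, hsw, ?_, ?_, ?_⟩
  · intro k hk0 hks
    have hkw : k < wall := lt_of_lt_of_le hks hsw
    have hnotdist := hnd k hk0 hks
    subst hdel hwall hdists
    interval_cases d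
    · rw [show pvDeltas.getD 0 (0, 0) = (-1, 0) from rfl] at hkw hnotdist ⊢
      rw [if_pos (by norm_num), if_pos (by norm_num)] at hkw
      rw [if_pos (by norm_num)] at hnotdist
      dsimp only at hkw hnotdist ⊢
      simp only [mul_zero, add_zero] at hnotdist ⊢
      refine ⟨⟨by omega, by omega, hc0, hcW⟩, ?_⟩
      intro hsharp
      apply hnotdist
      rw [List.mem_map]
      refine ⟨r + k * (-1), ?_, by ring⟩
      rw [pvColObst_cell m (r + k * (-1)) c (by omega) hc0]
      exact hsharp
    · rw [show pvDeltas.getD 1 (0, 0) = (0, 1) from rfl] at hkw hnotdist ⊢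
      rw [if_neg (by norm_num), if_neg (by norm_num)] at hkw
      rw [if_neg (by norm_num)] at hnotdist
      dsimp only at hkw hnotdist ⊢
      simp only [mul_zero, add_zero] at hnotdist ⊢
      refine ⟨⟨hr0, hrH, by omega, by omega⟩, ?_⟩
      intro hsharp
      apply hnotdist
      rw [List.mem_map]
      refine ⟨c + k * 1, ?_, by ring⟩
      rw [pvRowObst_cell m r (c + k * 1) hr0 (by omega)]
      exact hsharp
    · rw [show pvDeltas.getD 2 (0, 0) = (1, 0) from rfl] at hkw hnotdist ⊢
      rw [if_pos (by norm_num), if_neg (by norm_num)] at hkw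
      rw [if_pos (by norm_num)] at hnotdist
      dsimp only at hkw hnotdist ⊢
      simp only [mul_zero, add_zero] at hnotdist ⊢
      refine ⟨⟨by omega, by omega, hc0, hcW⟩, ?_⟩
      intro hsharp
      apply hnotdist
      rw [List.mem_map]
      refine ⟨r + k * 1, ?_, by ring⟩
      rw [pvColObst_cell m (r + k * 1) c (by omega) hc0]
      exact hsharp
    · rw [show pvDeltas.getD 3 (0, 0) = (0, -1) from rfl] at hkw hnotdist ⊢
      rw [if_neg (by norm_num), if_pos (by norm_num)] at hkw
      rw [if_neg (by norm_num)] at hnotdist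
      dsimp only at hkw hnotdist ⊢
      simp only [mul_zero, add_zero] at hnotdist ⊢
      refine ⟨⟨hr0, hrH, by omega, by omega⟩, ?_⟩
      intro hsharp
      apply hnotdist
      rw [List.mem_map]
      refine ⟨c + k * (-1), ?_, by ring⟩
      rw [pvRowObst_cell m r (c + k * (-1)) hr0 (by omega)]
      exact hsharp
  · intro hsw'
    subst hdel hwall
    interval_cases d
    · rw [show pvDeltas.getD 0 (0, 0) = (-1, 0) from rfl] at hsw' ⊢
      rw [if_pos (by norm_num), if_pos (by norm_num)] at hsw'
      dsimp only at hsw' ⊢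
      omega
    · rw [show pvDeltas.getD 1 (0, 0) = (0, 1) from rfl] at hsw' ⊢
      rw [if_neg (by norm_num), if_neg (by norm_num)] at hsw'
      dsimp only at hsw' ⊢
      omega
    · rw [show pvDeltas.getD 2 (0, 0) = (1, 0) from rfl] at hsw' ⊢
      rw [if_pos (by norm_num), if_neg (by norm_num)] at hsw'
      dsimp only at hsw' ⊢
      omega
    · rw [show pvDeltas.getD 3 (0, 0) = (0, -1) from rfl] at hsw' ⊢
      rw [if_neg (by norm_num), if_pos (by norm_num)] at hsw'
      dsimp only at hsw' ⊢
      omega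
  · intro hlt
    have hsd' := hsd hlt
    subst hdel hwall hdists
    interval_cases d
    · rw [show pvDeltas.getD 0 (0, 0) = (-1, 0) from rfl] at hlt hsd' ⊢
      rw [if_pos (by norm_num), if_pos (by norm_num)] at hlt
      rw [if_pos (by norm_num)] at hsd'
      dsimp only at hlt hsd' ⊢
      simp only [mul_zero, add_zero] at ⊢
      rw [List.mem_map] at hsd'
      obtain ⟨i, hi, hie⟩ := hsd'
      have hieq : i = r + step * (-1) := by omega
      subst hieq
      rw [pvColObst_cell m (r + step * (-1)) c (by omega) hc0] at hi
      exact ⟨⟨by omega, by omega, hc0, hcW⟩, hi⟩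
    · rw [show pvDeltas.getD 1 (0, 0) = (0, 1) from rfl] at hlt hsd' ⊢
      rw [if_neg (by norm_num), if_neg (by norm_num)] at hlt
      rw [if_neg (by norm_num)] at hsd'
      dsimp only at hlt hsd' ⊢
      simp only [mul_zero, add_zero] at ⊢
      rw [List.mem_map] at hsd'
      obtain ⟨j, hj, hje⟩ := hsd'
      have hjeq : j = c + step * 1 := by omega
      subst hjeq
      rw [pvRowObst_cell m r (c + step * 1) hr0 (by omega)] at hj
      exact ⟨⟨hr0, hrH, by omega, by omega⟩, hj⟩
    · rw [show pvDeltas.getD 2 (0, 0) = (1, 0) from rfl] at hlt hsd' ⊢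
      rw [if_pos (by norm_num), if_neg (by norm_num)] at hlt
      rw [if_pos (by norm_num)] at hsd'
      dsimp only at hlt hsd' ⊢
      simp only [mul_zero, add_zero] at ⊢
      rw [List.mem_map] at hsd'
      obtain ⟨i, hi, hie⟩ := hsd'
      have hieq : i = r + step * 1 := by omega
      subst hieq
      rw [pvColObst_cell m (r + step * 1) c (by omega) hc0] at hi
      exact ⟨⟨by omega, by omega, hc0, hcW⟩, hi⟩
    · rw [show pvDeltas.getD 3 (0, 0) = (0, -1) from rfl] at hlt hsd' ⊢
      rw [if_neg (by norm_num), if_pos (by norm_num)] at hlt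
      rw [if_neg (by norm_num)] at hsd'
      dsimp only at hlt hsd' ⊢
      simp only [mul_zero, add_zero] at ⊢
      rw [List.mem_map] at hsd'
      obtain ⟨j, hj, hje⟩ := hsd'
      have hjeq : j = c + step * (-1) := by omega
      subst hjeq
      rw [pvRowObst_cell m r (c + step * (-1)) hr0 (by omega)] at hj
      exact ⟨⟨hr0, hrH, by omega, by omega⟩, hj⟩

theorem pvWalkB_bounds (m : List (List String)) (H W : Int) :
    ∀ (n : Nat) (r c : Int) (d : Nat) (vis : PySem.Set (Int × Int)) (p : Int × Int),
    p ∈ pvWalkB n m H W r c d vis →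
    p ∈ vis ∨ (0 ≤ p.1 ∧ p.1 < H ∧ 0 ≤ p.2 ∧ p.2 < W) := by
  intro n
  induction n with
  | zero => intro r c d vis p hp; exact Or.inl hp
  | succ n ih =>
    intro r c d vis p hp
    simp only [pvWalkB] at hp
    split_ifs at hp with h1 h2
    · exact ih _ _ _ _ _ hp
    · rcases ih _ _ _ _ _ hp with h | h
      · rw [PySem.Set.mem_add] at h
        rcases h with h | h
        · exact Or.inl h
        · right
          rw [h]
          exact h1
      · exact Or.inr h
    · exact Or.inl hp

theorem pvAddSeg_sharp (m : List (List String)) (n : Nat) (r c dr dc : Int)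
    (vis : PySem.Set (Int × Int))
    (hvis : ∀ p ∈ vis, pvGet2 m p.1 p.2 ≠ "#")
    (hfree : ∀ k : Nat, k < n →
      pvGet2 m (r + ((k : Int) + 1) * dr) (c + ((k : Int) + 1) * dc) ≠ "#") :
    ∀ p ∈ pvAddSeg n r c dr dc vis, pvGet2 m p.1 p.2 ≠ "#" := by
  intro p hp
  rcases pvAddSeg_mem n r c dr dc vis p hp with h | ⟨k, hk, rfl⟩
  · exact hvis p h
  · exact hfree k hk

theorem pvWalkB_entry (m : List (List String)) (H W : Int) (fuel : Nat) (r c : Int)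
    (vis : PySem.Set (Int × Int)) (hc : ¬ c < W) :
    pvWalkB fuel m H W r c 0 vis = vis := by
  cases fuel with
  | zero => rfl
  | succ f =>
    simp only [pvWalkB, show pvDeltas.getD 0 (0, 0) = (-1, 0) from rfl]
    rw [if_pos (by rintro ⟨_, _, _, h4⟩; rw [add_zero] at h4; exact hc h4)]

theorem pvWalkSeg_entry (ro : List (List Int)) (co : PySem.Dict Int (List Int)) (H W : Int)
    (gas fuel : Nat) (r c : Int) (d : Nat) (vis : PySem.Set (Int × Int)) (hc : ¬ c < W) :
    pvWalkSeg gas fuel ro co H W r c d vis = vis := by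
  cases gas with
  | zero => rfl
  | succ g =>
    cases fuel with
    | zero => rfl
    | succ f =>
      simp only [pvWalkSeg]
      exact if_pos (by rintro ⟨_, _, _, h4⟩; exact hc h4)

theorem pvFindStartA_found :
    ∀ (rs : List (List String)) (i : Int), (∃ r ∈ rs, "^" ∈ r) →
    ∃ (k n : Nat), k < rs.length ∧ PySem.List.index? (rs.getD k []) "^" = some n ∧
      pvFindStartA rs i = (i + (k : Int), (n : Int)) := by
  intro rs
  induction rs with
  | nil => rintro i ⟨r, hr, _⟩; exact absurd hr (List.not_mem_nil)
  | cons r t ih =>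
    intro i hex
    by_cases hr : "^" ∈ r
    · have hs : (PySem.List.index? r "^").isSome := (PySem.List.index?_isSome_iff r "^").mpr hr
      obtain ⟨n, hn⟩ := Option.isSome_iff_exists.mp hs
      refine ⟨0, n, by simp, by simpa using hn, ?_⟩
      simp only [pvFindStartA, if_pos hr, hn]
      simp
    · obtain ⟨r', hr', hx⟩ := hex
      rcases List.mem_cons.mp hr' with rfl | hmem
      · exact absurd hx hr
      · obtain ⟨k, n, hk, hidx, heq⟩ := ih (i + 1) ⟨r', hmem, hx⟩
        refine ⟨k + 1, n, by simpa using Nat.succ_lt_succ hk, by simpa using hidx, ?_⟩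
        simp only [pvFindStartA, if_neg hr, heq]
        rw [Prod.mk.injEq]
        refine ⟨by push_cast; ring, rfl⟩

theorem pvFindStartA_none :
    ∀ (rs : List (List String)) (i : Int), (∀ r ∈ rs, "^" ∉ r) →
    pvFindStartA rs i = (0, 0) := by
  intro rs
  induction rs with
  | nil => intro i _; rfl
  | cons r t ih =>
    intro i hno
    simp only [pvFindStartA, if_neg (hno r List.mem_cons_self)]
    exact ih (i + 1) (fun r' h => hno r' (List.mem_cons_of_mem _ h))

theorem pvSeg_eq (m : List (List String)) :
    ∀ (gas fuel : Nat) (r c : Int) (d : Nat) (vis : PySem.Set (Int × Int)),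
    fuel ≤ gas →
    d < 4 → 0 ≤ r → r < (m.length : Int) → 0 ≤ c → c < ((m.headD []).length : Int) →
    (∀ p ∈ vis, pvGet2 m p.1 p.2 ≠ "#") →
    pvWalkB fuel m (m.length : Int) ((m.headD []).length : Int) r c d vis
      = pvWalkSeg gas fuel (pvRowObst m) (pvColObst m) (m.length : Int)
          ((m.headD []).length : Int) r c d vis := by
  intro gas
  induction gas with
  | zero =>
    intro fuel r c d vis hfg _ _ _ _ _ _
    interval_cases fuel
    rfl
  | succ g ih =>
    intro fuel r c d vis hfg hd hr0 hrH hc0 hcW hvis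
    match fuel with
    | 0 => rfl
    | Nat.succ f =>
      simp only [pvWalkSeg]
      rw [if_neg (not_not_intro ⟨hr0, hrH, hc0, hcW⟩)]
      set del := pvDeltas.getD d (0, 0) with hdel
      set dists := (if del.1 ≠ 0 then ((pvColObst m).getD c []).map (fun i => (i - r) * del.1)
          else (PySem.List.pyGetD (pvRowObst m) r []).map (fun j => (j - c) * del.2)) with hdists
      set wall := (if del.1 ≠ 0 then (if del.1 < 0 then r + 1 else ((m.length : Int)) - r)
          else (if del.2 < 0 then c + 1 else (((m.headD []).length : Int)) - c)) with hwall
      set step := (PySem.List.min? (dists.filter (fun t => decide (0 < t)) ++ [wall])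
          (fun t => t)).getD 0 with hstep
      obtain ⟨h1le, hsw, hF2, hF3, hF4⟩ :=
        pvStepFacts m r c d hd hr0 hrH hc0 hcW del dists wall step hdel hdists hwall hstep
      set L := (step - 1).toNat with hL
      have hLI : (L : Int) = step - 1 := by omega
      set n := min L (Nat.succ f) with hn
      rw [pvRangeFold_eq_addSeg n r c del.1 del.2 vis]
      have hfree : ∀ k : Nat, k < n →
          ((0 ≤ r + ((k : Int) + 1) * del.1 ∧ r + ((k : Int) + 1) * del.1 < (m.length : Int) ∧
            0 ≤ c + ((k : Int) + 1) * del.2 ∧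
            c + ((k : Int) + 1) * del.2 < ((m.headD []).length : Int)) ∧
          pvGet2 m (r + ((k : Int) + 1) * del.1) (c + ((k : Int) + 1) * del.2) ≠ "#") := by
        intro k hk
        exact hF2 ((k : Int) + 1) (by omega) (by omega)
      have hrun := pvWalkB_run m (m.length : Int) ((m.headD []).length : Int) d
        n (Nat.succ f) r c vis hfree
      by_cases htr : Nat.succ f ≤ L
      · -- fuel runs out inside the segment
        have hnf : n = Nat.succ f := by omega
        rw [hrun, if_pos (by omega), hnf]
        by_cases hsweq : step = wall
        · rw [if_pos hsweq]
        · rw [if_neg hsweq, if_pos htr]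
      · -- the full segment is walked
        have hnL : n = L := by omega
        rw [hrun, if_neg (by omega), hnL]
        have hvis' : ∀ p ∈ pvAddSeg L r c del.1 del.2 vis, pvGet2 m p.1 p.2 ≠ "#" :=
          pvAddSeg_sharp m L r c del.1 del.2 vis hvis
            (fun k hk => (hF2 ((k : Int) + 1) (by omega) (by omega)).2)
        by_cases hsweq : step = wall
        · rw [if_pos hsweq]
          have hf1 : Nat.succ f - L = Nat.succ (f - L) := by omega
          rw [hf1]
          simp only [pvWalkB, ← hdel]
          rw [if_pos (by
            have e1 : r + (L : Int) * del.1 + del.1 = r + step * del.1 := by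
              rw [hLI]; ring
            have e2 : c + (L : Int) * del.2 + del.2 = c + step * del.2 := by
              rw [hLI]; ring
            rw [e1, e2]
            exact hF3 hsweq)]
        · rw [if_neg hsweq, if_neg htr]
          have hlt : step < wall := lt_of_le_of_ne hsw hsweq
          obtain ⟨hbnd, hsharp⟩ := hF4 hlt
          have hf1 : Nat.succ f - L = Nat.succ (f - L) := by omega
          rw [hf1]
          simp only [pvWalkB, ← hdel]
          have e1 : r + (L : Int) * del.1 + del.1 = r + step * del.1 := by rw [hLI]; ring
          have e2 : c + (L : Int) * del.2 + del.2 = c + step * del.2 := by rw [hLI]; ring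
          rw [e1, e2]
          rw [if_neg (not_not_intro hbnd),
              if_pos ⟨hsharp, fun hmem => hvis' _ hmem hsharp⟩]
          have e3 : r + (L : Int) * del.1 = r + (step - 1) * del.1 := by rw [hLI]
          have e4 : c + (L : Int) * del.2 = c + (step - 1) * del.2 := by rw [hLI]
          rw [e3, e4]
          have hbpos : (0 ≤ r + (step - 1) * del.1 ∧ r + (step - 1) * del.1 < (m.length : Int) ∧
              0 ≤ c + (step - 1) * del.2 ∧
              c + (step - 1) * del.2 < ((m.headD []).length : Int)) := by
            by_cases hL0 : L = 0
            · have hs1 : step = 1 := by omega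
              have e0 : ∀ x y : Int, x + ((1 : Int) - 1) * y = x := by intro x y; ring
              rw [hs1, e0, e0]
              exact ⟨hr0, hrH, hc0, hcW⟩
            · exact (hF2 (step - 1) (by omega) (by omega)).1
          obtain ⟨hb1, hb2, hb3, hb4⟩ := hbpos
          exact ih (f - L) (r + (step - 1) * del.1) (c + (step - 1) * del.2)
            ((d + 1) % 4) (pvAddSeg L r c del.1 del.2 vis) (by omega) (Nat.mod_lt _ (by omega))
            hb1 hb2 hb3 hb4 hvis'

theorem find_trajectory_equal (map : List (List String)) (h : Pre_find_trajectory map) :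
    find_trajectory map = find_trajectory_alt map := by
  by_cases hfound : ∃ r ∈ map, "^" ∈ r
  · -- a guard is on the map
    have hW : ∀ r ∈ map, (map.headD []).length ≤ r.length := by
      rcases h with ⟨_, hW⟩ | ⟨hno, _⟩
      · exact hW
      · obtain ⟨r, hr, hx⟩ := hfound
        exact absurd hx (hno r hr)
    obtain ⟨k, n, hkH, hidx, hstart⟩ := pvFindStartA_found map 0 hfound
    have hstart' : pvFindStartA map 0 = ((k : Int), (n : Int)) := by
      rw [hstart]; norm_num
    obtain ⟨hnlen, hcell, -⟩ := PySem.List.getElem_of_index?_eq_some hidx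
    have hcellD : (map.getD k []).getD n "" = "^" := by
      rw [List.getD_eq_getElem _ _ hnlen]; exact hcell
    have hget : pvGet2 map (k : Int) (n : Int) = "^" := by
      rw [pvGet2_nonneg map _ _ (by positivity) (by positivity)]
      simpa using hcellD
    set K := 8 * map.length * (map.headD []).length + 8 with hK
    have hrel := pvWalk_rel map K map [((k : Int), (n : Int))] (k : Int) (n : Int) 0 (by omega)
      (pvRel_init map ((k : Int), (n : Int)) (by positivity) (by positivity))
    set visB := pvWalkB K map (map.length : Int) ((map.headD []).length : Int)
      (k : Int) (n : Int) 0 [((k : Int), (n : Int))] with hvisB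
    have hA : find_trajectory map = pvCountFormula map visB := by
      simp only [find_trajectory, ← hK, hstart', show "^" = pvDirChar 0 from rfl]
      exact pvRel_count map _ _ _ _ hrel
    have hVV : pvWalkSeg K K (pvRowObst map) (pvColObst map) (map.length : Int)
        ((map.headD []).length : Int) (k : Int) (n : Int) 0
        (PySem.Set.ofList [((k : Int), (n : Int))]) = visB := by
      have hofl : PySem.Set.ofList [((k : Int), (n : Int))] = [((k : Int), (n : Int))] := rfl
      rw [hofl]
      by_cases hnW : (n : Int) < ((map.headD []).length : Int)
      · refine (pvSeg_eq map K K (k : Int) (n : Int) 0 _ (le_refl K) (by omega) (by positivity)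
          (by exact_mod_cast hkH) (by positivity) hnW ?_).symm
        intro p hp
        rw [List.mem_singleton] at hp
        rw [hp, hget]
        decide
      · rw [pvWalkSeg_entry _ _ _ _ _ _ _ _ _ _ hnW, hvisB,
            pvWalkB_entry _ _ _ _ _ _ _ hnW]
    have hbnds : ∀ p ∈ visB, 0 ≤ p.1 ∧ p.1.toNat < map.length ∧ 0 ≤ p.2 ∧
        p.2.toNat < (map.getD p.1.toNat []).length := by
      intro p hp
      rcases pvWalkB_bounds map _ _ K _ _ _ _ p hp with hm | ⟨h1, h2, h3, h4⟩
      · rw [List.mem_singleton] at hm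
        rw [hm]
        exact ⟨by positivity, by simpa using hkH, by positivity, by simpa using hnlen⟩
      · refine ⟨h1, by omega, h3, ?_⟩
        have hrow : map.getD p.1.toNat [] ∈ map := by
          rw [List.getD_eq_getElem _ _ (by omega)]
          exact List.getElem_mem _
        have := hW _ hrow
        omega
    have hB : find_trajectory_alt map = pvCountFormula map visB := by
      simp only [find_trajectory_alt, ← hK, ← pvFindStart_eq map 0, hstart', hVV]
      exact pvMarked_count map visB hbnds
    rw [hA, hB]
  · -- no guard: A breaks immediately from (0, 0)
    obtain ⟨hne, hrow0⟩ : map ≠ [] ∧ map.headD [] ≠ [] := by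
      rcases h with ⟨hex, _⟩ | ⟨_, h2, h3⟩
      · exact absurd hex hfound
      · exact ⟨h2, h3⟩
    have hno : ∀ r ∈ map, "^" ∉ r := by
      intro r hr hx
      exact hfound ⟨r, hr, hx⟩
    have hstart := pvFindStartA_none map 0 hno
    have hH : 0 < (map.length : Int) := by
      simpa using List.length_pos_iff.mpr hne
    have hWpos : 0 < ((map.headD []).length : Int) := by
      simpa using List.length_pos_iff.mpr hrow0
    set K := 8 * map.length * (map.headD []).length + 8 with hK
    have hKs : K = Nat.succ (8 * map.length * (map.headD []).length + 7) := rfl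
    have hA : find_trajectory map
        = (pvSet2 map 0 0 "X").foldl
            (fun acc row => acc + ((PySem.List.count row "X" : Nat) : Int)) 0 := by
      simp only [find_trajectory, ← hK, hstart]
      rw [hKs, show ("^" : String) = pvDirChar 0 from rfl, pvStepA_succ _ map 0 0 0 (by omega)]
      rw [if_pos (by
        rintro ⟨h1, -⟩
        rw [show pvDeltas.getD 0 (0, 0) = (-1, 0) from rfl] at h1
        omega)]
    have hseg : pvWalkSeg K K (pvRowObst map) (pvColObst map) (map.length : Int)
        ((map.headD []).length : Int) 0 0 0 (PySem.Set.ofList [((0 : Int), (0 : Int))])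
        = [((0 : Int), (0 : Int))] := by
      rw [hKs]
      simp only [pvWalkSeg]
      rw [if_neg (not_not_intro ⟨le_refl 0, hH, le_refl 0, hWpos⟩)]
      rw [show pvDeltas.getD 0 (0, 0) = ((-1 : Int), (0 : Int)) from rfl]
      dsimp only
      rw [if_pos (show (-1 : Int) ≠ 0 by norm_num), if_pos (show (-1 : Int) ≠ 0 by norm_num),
          if_pos (show (-1 : Int) < 0 by norm_num)]
      have hfil : (((pvColObst map).getD 0 []).map (fun i => (i - 0) * -1)).filter
          (fun t => decide (0 < t)) = [] := by
        rw [List.filter_eq_nil_iff]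
        rintro t ht
        rw [List.mem_map] at ht
        obtain ⟨i, hi, rfl⟩ := ht
        have h0 := ((pvColObst_mem map i 0).mp hi).1
        simp
        omega
      rw [hfil, List.nil_append]
      rw [show (PySem.List.min? ([(0 : Int) + 1]) (fun t => t)).getD 0 = 0 + 1 from rfl]
      rw [if_pos rfl]
      rw [show ((0 : Int) + 1 - 1).toNat = 0 from rfl, Nat.zero_min]
      rw [show (((0 : Nat) : Int) + 1) = 1 by norm_num]
      rw [show PySem.List.pyRange 1 1 = ([] : List Int) from rfl, List.foldl_nil]
      rfl
    have hB : find_trajectory_alt map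
        = ((pvSet2 map 0 0 "X").map (fun row => ((PySem.List.count row "X" : Nat) : Int))).sum := by
      simp only [find_trajectory_alt, ← hK, ← pvFindStart_eq map 0, hstart, hseg]
      rfl
    rw [hA, hB, PySem.List.foldl_add]
    simp

-- ===== VERDICT (by name: the statement is the Claim_ definition above) =====
theorem find_trajectory_spec : Claim_equal_find_trajectory := by
  intro map _ hpre
  unfold Spec_find_trajectory
  exact find_trajectory_equal map hpre
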